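-- pv_equiv track=rewrite | github.com/Gyuminn/Algorithm | programmers/lv2_귤고르기.py | solution
-- ===== SOURCE A (Python) =====
-- def solution(k, tangerine):
--     dict = {}
--
--     for i in tangerine:
--         dict[i] = dict.get(i, 0) + 1
--
--     # 많은 순으로 뽑기
--     a = sorted(dict.items(), key=lambda x: x[1], reverse=True)
--
--     acc = 0
--     key_cnt = 0
--     for key, value in a:
--         if acc >= k:
--             break
--         acc += value
--         key_cnt += 1
--
--     return key_cnt
-- ===== SOURCE B (Python) =====
-- def solution(k, tangerine):
--     freq = {}
--     for i in tangerine: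
--         freq[i] = freq.get(i, 0) + 1
--
--     maxf = 0
--     for f in freq.values():
--         if f > maxf:
--             maxf = f
--
--     buckets = [0] * (maxf + 1)
--     for f in freq.values():
--         buckets[f] += 1
--
--     acc = 0
--     key_cnt = 0
--     for f in range(maxf, 0, -1):
--         for _ in range(buckets[f]):
--             if acc >= k:
--                 return key_cnt
--             acc += f
--             key_cnt += 1
--     return key_cnt
-- ===== Notes on version B (the rewrite author's own statement) =====
-- stated objective: alternative
-- what changed: B replaces A's comparison sort of the (size, frequency) pairs by a counting-sort-style histogram over frequencies (buckets[f] = number of distinct sizes with frequency f), scanned from the maximum frequency downward with the same greedy accumulation.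
import Mathlib
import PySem

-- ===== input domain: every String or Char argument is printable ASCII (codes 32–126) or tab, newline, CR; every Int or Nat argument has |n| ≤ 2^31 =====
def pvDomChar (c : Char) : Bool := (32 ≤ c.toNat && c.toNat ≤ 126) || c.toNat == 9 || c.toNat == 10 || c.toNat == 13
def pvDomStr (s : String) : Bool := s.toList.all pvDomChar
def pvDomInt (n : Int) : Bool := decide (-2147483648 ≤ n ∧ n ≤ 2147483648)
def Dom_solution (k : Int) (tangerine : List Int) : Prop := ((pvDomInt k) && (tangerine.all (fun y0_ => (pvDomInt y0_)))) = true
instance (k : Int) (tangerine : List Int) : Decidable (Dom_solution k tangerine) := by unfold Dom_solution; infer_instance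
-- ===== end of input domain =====

-- B replaces A's comparison sort of (size, frequency) pairs by a counting-bucket pass over
-- frequencies (histogram indexed by frequency, scanned from the max down): an alternative algorithm.


-- ===== PORT A =====
-- the 'for key, value in a: if acc >= k: break …' loop (break ported as stopping recursion)
def pvLoopA (k : Int) : List (Int × Int) → Int → Int → Int
  | [], _, cnt => cnt
  | p :: rest, acc, cnt =>
    if acc ≥ k then cnt else pvLoopA k rest (acc + p.2) (cnt + 1)

def solution (k : Int) (tangerine : List Int) : Int :=
  let d := tangerine.foldl (fun d i => d.insert i (d.getD i 0 + 1)) PySem.Dict.empty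
  let a := PySem.List.sorted d.items (fun x => x.2) true
  pvLoopA k a 0 0

-- ===== PORT B =====
-- the inner 'for _ in range(buckets[f])' loop; '.error cnt' is the early 'return key_cnt'
def pvInnerB (k f : Int) : Nat → Int → Int → Except Int (Int × Int)
  | 0, acc, cnt => .ok (acc, cnt)
  | n + 1, acc, cnt =>
    if acc ≥ k then .error cnt else pvInnerB k f n (acc + f) (cnt + 1)

-- the outer 'for f in range(maxf, 0, -1)' loop
def pvOuterB (k : Int) (buckets : List Int) : List Int → Int → Int → Int
  | [], _, cnt => cnt
  | f :: fs, acc, cnt =>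
    match pvInnerB k f (PySem.List.pyGetD buckets f 0).toNat acc cnt with
    | .error c => c
    | .ok (acc', cnt') => pvOuterB k buckets fs acc' cnt'

def solution_alt (k : Int) (tangerine : List Int) : Int :=
  let freq := tangerine.foldl (fun d i => d.insert i (d.getD i 0 + 1)) PySem.Dict.empty
  let maxf := freq.values.foldl (fun m f => if f > m then f else m) 0
  let buckets := freq.values.foldl
    (fun b f => PySem.List.pySetD b f (PySem.List.pyGetD b f 0 + 1))
    (PySem.List.pyRepeat [0] (maxf + 1))
  pvOuterB k buckets (PySem.List.pyRange maxf 0 (-1)) 0 0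

-- ===== PRECONDITION & SPEC =====
def Spec_solution (k : Int) (tangerine : List Int) (out : Int) : Prop := out = solution_alt k tangerine
instance (k : Int) (tangerine : List Int) (out : Int) : Decidable (Spec_solution k tangerine out) := by unfold Spec_solution; infer_instance

-- ===== CLAIM (what is proved, stated in full; the proofs are below) =====
def Claim_equal_solution : Prop := ∀ (k : Int) (tangerine : List Int), Dom_solution k tangerine → Spec_solution k tangerine (solution k tangerine)

-- ===== LEMMAS AND PROOFS =====

-- the common greedy over a plain list of frequency values
def pvGreedy (k : Int) : List Int → Int → Int → Int
  | [], _, cnt => cnt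
  | v :: vs, acc, cnt => if acc ≥ k then cnt else pvGreedy k vs (acc + v) (cnt + 1)

theorem pvLoopA_eq_greedy (k : Int) (l : List (Int × Int)) (acc cnt : Int) :
    pvLoopA k l acc cnt = pvGreedy k (l.map (·.2)) acc cnt := by
  induction l generalizing acc cnt with
  | nil => rfl
  | cons p rest ih => simp [pvLoopA, pvGreedy, ih]

theorem pvInnerB_greedy (k f : Int) (n : Nat) (rest : List Int) (acc cnt : Int) :
    pvGreedy k (List.replicate n f ++ rest) acc cnt =
      match pvInnerB k f n acc cnt with
      | .error c => c
      | .ok (acc', cnt') => pvGreedy k rest acc' cnt' := by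
  induction n generalizing acc cnt with
  | zero => rfl
  | succ m ih =>
    simp only [List.replicate_succ, List.cons_append, pvGreedy, pvInnerB]
    split_ifs <;> simp [ih]

theorem pvOuterB_eq_greedy (k : Int) (b : List Int) (fs : List Int) (acc cnt : Int) :
    pvOuterB k b fs acc cnt =
      pvGreedy k (fs.flatMap (fun f => List.replicate (PySem.List.pyGetD b f 0).toNat f)) acc cnt := by
  induction fs generalizing acc cnt with
  | nil => rfl
  | cons f fs ih =>
    simp only [List.flatMap_cons, pvOuterB]
    rw [pvInnerB_greedy]
    cases h : pvInnerB k f (PySem.List.pyGetD b f 0).toNat acc cnt with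
    | error c => rfl
    | ok p => cases p; simp [ih]

-- counting into a bucket array: pyGetD of the fold is the old entry plus the count
theorem pvBuckets_count (vs : List Int) (b : List Int) (x : Int)
    (hvs : ∀ v ∈ vs, 0 ≤ v ∧ v < (b.length : Int)) (hx0 : 0 ≤ x) (hx : x < (b.length : Int)) :
    PySem.List.pyGetD
      (vs.foldl (fun b f => PySem.List.pySetD b f (PySem.List.pyGetD b f 0 + 1)) b) x 0 =
      PySem.List.pyGetD b x 0 + (vs.count x : Int) := by
  induction vs generalizing b with
  | nil => simp
  | cons v vs ih =>
    have hv := hvs v (by simp)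
    have hlen : (PySem.List.pySetD b v (PySem.List.pyGetD b v 0 + 1)).length = b.length :=
      PySem.List.length_pySetD _ _ _
    simp only [List.foldl_cons]
    rw [ih _ (fun w hw => by rw [hlen]; exact hvs w (List.mem_cons_of_mem v hw))
          (by rw [hlen]; exact hx)]
    rw [PySem.List.pySetD_of_nonneg b _ hv.1,
        PySem.List.pyGetD_eq_getElem _ 0 hx0 (by simpa using hx),
        PySem.List.pyGetD_eq_getElem b 0 hx0 hx,
        PySem.List.pyGetD_eq_getElem b 0 hv.1 (by exact_mod_cast hv.2),
        List.getElem_set]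
    by_cases hxv : x = v
    · subst hxv
      simp only [List.count_cons_self]
      push_cast
      ring
    · have hne : v.toNat ≠ x.toNat := by omega
      rw [if_neg hne, List.count_cons_of_ne (Ne.symm hxv)]

-- count in a flatMap of replicates over a Nodup index list
theorem pvCount_flatMap_replicate (fs : List Int) (c : Int → Nat) (a : Int) (hnd : fs.Nodup) :
    (fs.flatMap (fun f => List.replicate (c f) f)).count a = if a ∈ fs then c a else 0 := by
  induction fs with
  | nil => simp
  | cons f fs ih =>
    simp only [List.flatMap_cons, List.count_append, List.nodup_cons] at *
    rw [ih hnd.2, List.count_replicate]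
    by_cases hfa : a = f
    · subst hfa; simp [hnd.1]
    · simp [hfa, Ne.symm hfa]

-- flatMap of replicates over a strictly decreasing list is nonincreasing
theorem pvPairwise_flatMap_replicate (fs : List Int) (c : Int → Nat)
    (h : fs.Pairwise (· > ·)) :
    (fs.flatMap (fun f => List.replicate (c f) f)).Pairwise (fun a b => b ≤ a) := by
  induction fs with
  | nil => simp
  | cons f fs ih =>
    rcases List.pairwise_cons.mp h with ⟨hf, hfs⟩
    simp only [List.flatMap_cons]
    apply List.pairwise_append.mpr
    refine ⟨List.pairwise_replicate.mpr (by simp), ih hfs, ?_⟩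
    intro a ha b hb
    rcases List.eq_of_mem_replicate ha with rfl
    obtain ⟨g, hg, hbg⟩ := List.mem_flatMap.mp hb
    obtain rfl := List.eq_of_mem_replicate hbg
    exact le_of_lt (hf _ hg)

-- the main equality of the two value sequences, then the verdict
-- length of the bucket array is unchanged by the counting fold
theorem pvFoldLen (vs : List Int) (b : List Int) :
    (vs.foldl (fun b f => PySem.List.pySetD b f (PySem.List.pyGetD b f 0 + 1)) b).length
      = b.length := by
  induction vs generalizing b with
  | nil => rfl
  | cons v vs ih => simp only [List.foldl_cons]; rw [ih]; exact PySem.List.length_pySetD _ _ _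

theorem solution_eq_alt (k : Int) (tangerine : List Int) :
    solution k tangerine = solution_alt k tangerine := by
  simp only [solution, solution_alt, PySem.Dict.foldl_insert_getD_add_one_eq_counter]
  -- the list of frequency values
  set vals : List Int := (PySem.Dict.counter tangerine).values with hvals
  have hvalsdef : vals = (PySem.Set.ofList tangerine).map (fun t => (tangerine.count t : Int)) := by
    show (PySem.Dict.counter tangerine).items.map (·.2) = _
    rw [PySem.Dict.items_counter]
    simp [List.map_map, Function.comp]
  have hpos : ∀ v ∈ vals, 1 ≤ v := by
    rw [hvalsdef]
    intro v hv
    obtain ⟨t, ht, rfl⟩ := List.mem_map.mp hv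
    have : t ∈ tangerine := (PySem.Set.mem_ofList _ _).mp ht
    exact_mod_cast List.count_pos_iff.mpr this
  -- maxf is the running maximum
  have hmaxfun : (fun (m f : Int) => if f > m then f else m) = (fun (m f : Int) => max m f) := by
    funext m f
    rw [max_def]
    split_ifs <;> omega
  rw [hmaxfun]
  set maxf : Int := vals.foldl (fun m f => max m f) 0 with hmaxf
  have hmax := PySem.List.le_foldl_max vals 0
  have hmax0 : 0 ≤ maxf := hmax.1
  have hmaxv : ∀ v ∈ vals, v ≤ maxf := hmax.2
  -- the bucket array
  set buckets : List Int := vals.foldl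
      (fun b f => PySem.List.pySetD b f (PySem.List.pyGetD b f 0 + 1))
      (PySem.List.pyRepeat [0] (maxf + 1)) with hb
  have hlenb : (buckets.length : Int) = maxf + 1 := by
    rw [hb, pvFoldLen, PySem.List.pyRepeat_singleton, List.length_replicate]
    omega
  have hinrange : ∀ v ∈ vals, 0 ≤ v ∧ v <
      (((PySem.List.pyRepeat [(0:Int)] (maxf + 1)).length : Nat) : Int) := by
    intro v hv
    rw [PySem.List.pyRepeat_singleton, List.length_replicate]
    have h1 := hpos v hv
    have h2 := hmaxv v hv
    omega
  have hbucket : ∀ x : Int, 0 < x → x ≤ maxf →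
      PySem.List.pyGetD buckets x 0 = (vals.count x : Int) := by
    intro x h0 h1
    rw [hb, pvBuckets_count vals _ x hinrange (by omega)
          (by rw [PySem.List.pyRepeat_singleton, List.length_replicate]; omega)]
    rw [PySem.List.pyGetD_eq_getElem _ 0 (by omega)
          (by rw [PySem.List.pyRepeat_singleton, List.length_replicate]; omega)]
    simp [PySem.List.pyRepeat_singleton]
  -- the two value sequences
  set L1 : List Int :=
    (PySem.List.sorted (PySem.Dict.counter tangerine).items (fun x => x.2) true).map (·.2) with hL1
  set rng : List Int := PySem.List.pyRange maxf 0 (-1) with hrng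
  set L2 : List Int :=
    rng.flatMap (fun f => List.replicate (PySem.List.pyGetD buckets f 0).toNat f) with hL2
  have hrngrev : rng = (PySem.List.pyRange 1 (maxf + 1) 1).reverse := by
    rw [hrng, PySem.List.pyRange_neg_one_eq_reverse]
    norm_num
  have hrngnd : rng.Nodup := by
    rw [hrngrev]
    exact List.nodup_reverse.mpr (PySem.List.nodup_pyRange_one 1 (maxf + 1))
  have hmemrng : ∀ a : Int, a ∈ rng ↔ 0 < a ∧ a ≤ maxf := by
    intro a; rw [hrng]; exact PySem.List.mem_pyRange_neg_one
  -- both are permutations of vals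
  have hperm1 : L1.Perm vals :=
    (PySem.List.sorted_perm (PySem.Dict.counter tangerine).items (fun x => x.2) true).map (·.2)
  have hperm2 : L2.Perm vals := by
    apply List.perm_iff_count.mpr
    intro a
    rw [hL2, pvCount_flatMap_replicate rng _ a hrngnd]
    by_cases ha : a ∈ rng
    · have h := (hmemrng a).mp ha
      rw [if_pos ha, hbucket a h.1 h.2, Int.toNat_natCast]
    · rw [if_neg ha]
      by_cases hav : a ∈ vals
      · exact absurd ((hmemrng a).mpr ⟨by have := hpos a hav; omega, hmaxv a hav⟩) ha
      · exact (List.count_eq_zero.mpr hav).symm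
  -- both are sorted in nonincreasing order
  have hsort1 : L1.Pairwise (fun a b => b ≤ a) := by
    rw [hL1]
    exact List.pairwise_map.mpr
      (PySem.List.sorted_pairwise_rev (PySem.Dict.counter tangerine).items (fun x => x.2))
  have hsort2 : L2.Pairwise (fun a b => b ≤ a) := by
    apply pvPairwise_flatMap_replicate
    rw [hrngrev]
    exact List.pairwise_reverse.mpr (PySem.List.pairwise_lt_pyRange_one 1 (maxf + 1))
  -- hence equal, and the greedy loops agree
  have hL12 : L1 = L2 :=
    (hperm1.trans hperm2.symm).eq_of_pairwise (fun a b _ _ h h' => le_antisymm h' h) hsort1 hsort2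
  rw [pvLoopA_eq_greedy, pvOuterB_eq_greedy, ← hL1, ← hL2, hL12]

-- ===== VERDICT (by name: the statement is the Claim_ definition above) =====
theorem solution_spec : Claim_equal_solution := by
  intro k tangerine _
  unfold Spec_solution
  exact solution_eq_alt k tangerine
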